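-- pv_equiv track=rewrite | github.com/sghong977/Daily-Algorithm | 2022카카오블라인드/report_result.py | solution
-- ===== SOURCE A (Python) =====
-- def solution(id_list, report, k):
--     report_cnt = [0]*len(id_list)
--     name2id = dict()
--     for i in range(len(id_list)):
--         name2id[id_list[i]] = i
--     adj_list=[]
--     for i in range(len(id_list)):
--         adj_list.append([])
--
--     # before loop, dup reduce in report
--     # 여기 엣지 중복제거 과정에서 시간초과가 날수 있으니 유의하자
--     result = []
--     #for value in report:
--     #    if value not in result:
--     #        result.append(value)
--
--     result = list(set(report))
--
--     for r in result:
--         fr, to = r.split(' ')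
--         report_cnt[name2id[to]] += 1
--         adj_list[name2id[fr]] += [name2id[to]]
--
--     # check if report_cnt >1
--     answer = []
--     for i in adj_list:
--         cnt = 0
--         for j in i:
--             if report_cnt[j] > (k-1):
--                 cnt += 1
--         answer.append(cnt)
--     return answer
-- ===== SOURCE B (Python) =====
-- def solution(id_list, report, k):
--     name2id = {name: i for i, name in enumerate(id_list)}
--     dedup = set(report)
--     report_cnt = [0] * len(id_list)
--     for r in dedup:
--         fr, to = r.split(' ')
--         report_cnt[name2id[to]] += 1
--     banned = {i for i in range(len(id_list)) if report_cnt[i] >= k}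
--     answer = [0] * len(id_list)
--     for r in dedup:
--         fr, to = r.split(' ')
--         if name2id[to] in banned:
--             answer[name2id[fr]] += 1
--     return answer
-- ===== Notes on version B (the rewrite author's own statement) =====
-- stated objective: simpler
-- what changed: Replaces A's adjacency-list grouping plus nested counting pass with a banned set and a second direct pass over the deduped reports that increments per-reporter counters.
import Mathlib
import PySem

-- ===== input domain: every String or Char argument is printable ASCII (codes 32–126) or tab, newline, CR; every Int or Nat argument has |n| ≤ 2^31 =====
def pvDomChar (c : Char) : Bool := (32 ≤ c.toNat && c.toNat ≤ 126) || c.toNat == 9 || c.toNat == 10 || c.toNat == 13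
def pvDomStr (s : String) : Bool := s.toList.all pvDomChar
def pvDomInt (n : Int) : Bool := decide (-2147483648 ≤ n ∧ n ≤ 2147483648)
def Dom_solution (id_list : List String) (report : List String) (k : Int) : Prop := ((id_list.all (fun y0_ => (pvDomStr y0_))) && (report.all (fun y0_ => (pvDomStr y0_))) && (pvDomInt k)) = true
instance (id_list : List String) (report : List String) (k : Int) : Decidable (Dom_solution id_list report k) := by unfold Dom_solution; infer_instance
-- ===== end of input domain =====

-- B replaces A's adjacency-list grouping + nested counting pass by a banned index set and a second
-- direct pass over the deduped reports incrementing per-reporter counters (objective: simpler).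
-- Both Pythons iterate list(set(report)); the result is independent of that order, and both ports
-- use PySem.Set.ofList (first-occurrence order) for it.

-- ===== PORT A =====
def a_name2id (id_list : List String) : PySem.Dict String Int :=
  (PySem.List.pyRange 0 (PySem.List.len id_list)).foldl
    (fun d i => d.insert (PySem.List.pyGetD id_list i "") i) PySem.Dict.empty

def a_step (d : PySem.Dict String Int)
    (s : List Int × List (List Int)) (r : String) : List Int × List (List Int) :=
  let parts := (PySem.Str.split? r " ").getD []
  let fr := parts.getD 0 ""
  let tn := parts.getD 1 ""
  let cnt := PySem.List.pySetD s.1 (d.getD tn 0) (PySem.List.pyGetD s.1 (d.getD tn 0) 0 + 1)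
  let adj := PySem.List.pySetD s.2 (d.getD fr 0) (PySem.List.pyGetD s.2 (d.getD fr 0) [] ++ [d.getD tn 0])
  (cnt, adj)

def solution (id_list : List String) (report : List String) (k : Int) : List Int :=
  let d := a_name2id id_list
  let adj0 := (PySem.List.pyRange 0 (PySem.List.len id_list)).foldl (fun a _ => a ++ [([] : List Int)]) []
  let st := (PySem.Set.ofList report).foldl (a_step d) (List.replicate id_list.length (0 : Int), adj0)
  st.2.foldl (fun ans row =>
    ans ++ [row.foldl (fun c j => if PySem.List.pyGetD st.1 j 0 > k - 1 then c + 1 else c) 0]) []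

-- ===== PORT B =====
def b_name2id (id_list : List String) : PySem.Dict String Int :=
  (PySem.List.enumerate id_list).foldl (fun d p => d.insert p.2 p.1) PySem.Dict.empty

def b_fr (d : PySem.Dict String Int) (r : String) : Int :=
  d.getD (((PySem.Str.split? r " ").getD []).getD 0 "") 0

def b_to (d : PySem.Dict String Int) (r : String) : Int :=
  d.getD (((PySem.Str.split? r " ").getD []).getD 1 "") 0

def solution_alt (id_list : List String) (report : List String) (k : Int) : List Int :=
  let d := b_name2id id_list
  let dedup := PySem.Set.ofList report
  let cnt := dedup.foldl
    (fun c r => PySem.List.pySetD c (b_to d r) (PySem.List.pyGetD c (b_to d r) 0 + 1))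
    (List.replicate id_list.length (0 : Int))
  let banned : PySem.Set Int := PySem.Set.ofList
    ((PySem.List.pyRange 0 (PySem.List.len id_list)).filter (fun i => decide (PySem.List.pyGetD cnt i 0 ≥ k)))
  dedup.foldl
    (fun ans r =>
      if banned.contains (b_to d r) then
        PySem.List.pySetD ans (b_fr d r) (PySem.List.pyGetD ans (b_fr d r) 0 + 1)
      else ans)
    (List.replicate id_list.length (0 : Int))

-- ===== PRECONDITION & SPEC =====
-- Pre_ excludes exactly the reports on which Python A raises: a report string that does not split
-- on ' ' into exactly two parts (ValueError on unpacking) or that names someone absent from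
-- id_list (KeyError in name2id); B raises there too.
def Pre_solution (id_list : List String) (report : List String) (k : Int) : Prop :=
  ∀ r ∈ report,
    ((PySem.Str.split? r " ").getD []).length = 2 ∧
    ((PySem.Str.split? r " ").getD []).getD 0 "" ∈ id_list ∧
    ((PySem.Str.split? r " ").getD []).getD 1 "" ∈ id_list
instance (id_list : List String) (report : List String) (k : Int) : Decidable (Pre_solution id_list report k) := by unfold Pre_solution; infer_instance

def pvWitness_solution : List String × List String × Int := (["muzi", "frodo"], ["muzi frodo", "frodo muzi"], 1)

def Spec_solution (id_list : List String) (report : List String) (k : Int) (out : List Int) : Prop := out = solution_alt id_list report k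
instance (id_list : List String) (report : List String) (k : Int) (out : List Int) : Decidable (Spec_solution id_list report k out) := by unfold Spec_solution; infer_instance

-- ===== CLAIM (what is proved, stated in full; the proofs are below) =====
def Claim_equal_solution : Prop := ∀ (id_list : List String) (report : List String) (k : Int), Dom_solution id_list report k → Pre_solution id_list report k → Spec_solution id_list report k (solution id_list report k)

-- ===== LEMMAS AND PROOFS =====

-- the two dict-building loops produce the same dict
lemma name2id_eq (id_list : List String) : b_name2id id_list = a_name2id id_list := by
  simp [b_name2id, a_name2id, PySem.List.enumerate_eq_map_pyRange id_list "", List.foldl_map]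

lemma ins_get?_of_not_mem (l : List (Int × String)) (d : PySem.Dict String Int) (x : String)
    (h : ∀ p ∈ l, p.2 ≠ x) :
    (l.foldl (fun d p => d.insert p.2 p.1) d).get? x = d.get? x := by
  induction l generalizing d with
  | nil => rfl
  | cons p l ih =>
    simp only [List.foldl_cons]
    rw [ih _ (fun q hq => h q (List.mem_cons_of_mem _ hq)), PySem.Dict.get?_insert,
        if_neg (fun hxp => h p List.mem_cons_self hxp.symm)]

lemma ins_get?_of_mem (l : List (Int × String)) (d : PySem.Dict String Int) (x : String)
    (h : ∃ p ∈ l, p.2 = x) :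
    ∃ p, p ∈ l ∧ p.2 = x ∧ (l.foldl (fun d p => d.insert p.2 p.1) d).get? x = some p.1 := by
  induction l generalizing d with
  | nil => simp at h
  | cons p l ih =>
    by_cases hm : ∃ q ∈ l, q.2 = x
    · obtain ⟨q, hq, hqx, hval⟩ := ih (d.insert p.2 p.1) hm
      exact ⟨q, List.mem_cons_of_mem _ hq, hqx, hval⟩
    · simp only [not_exists, not_and] at hm
      obtain ⟨q, hq, hqx⟩ := h
      rcases List.mem_cons.1 hq with rfl | hq'
      · refine ⟨q, List.mem_cons_self, hqx, ?_⟩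
        simp only [List.foldl_cons]
        rw [ins_get?_of_not_mem _ _ _ hm, PySem.Dict.get?_insert]
        simp [hqx]
      · exact absurd hqx (hm q hq')

lemma name2id_bound (id_list : List String) (x : String) (hx : x ∈ id_list) :
    0 ≤ (a_name2id id_list).getD x 0 ∧ (a_name2id id_list).getD x 0 < (id_list.length : Int) := by
  rw [← name2id_eq]
  obtain ⟨i, hi, hix⟩ := List.mem_iff_getElem.1 hx
  have hmem : ((i : Int), x) ∈ PySem.List.enumerate id_list :=
    (PySem.List.mem_enumerate_iff _ _ _).2 ⟨i, hi, by simp [hix]⟩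
  obtain ⟨p, hp, hpx, hval⟩ := ins_get?_of_mem (PySem.List.enumerate id_list) PySem.Dict.empty x
    ⟨((i : Int), x), hmem, rfl⟩
  obtain ⟨j, hj, rfl⟩ := (PySem.List.mem_enumerate_iff _ _ _).1 hp
  simp only [b_name2id, PySem.Dict.getD, hval, Option.getD_some]
  constructor <;> omega

-- the first component of A's pair fold is B's counter fold
lemma a_fold_fst (d : PySem.Dict String Int) (l : List String) (s : List Int × List (List Int)) :
    (l.foldl (a_step d) s).1 =
      l.foldl (fun c r => PySem.List.pySetD c (b_to d r) (PySem.List.pyGetD c (b_to d r) 0 + 1)) s.1 := by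
  induction l generalizing s with
  | nil => rfl
  | cons r l ih =>
    simp only [List.foldl_cons, ih]
    congr 1

-- the second component of A's pair fold is a grouping fold over the same edges
lemma a_fold_snd (d : PySem.Dict String Int) (l : List String) (s : List Int × List (List Int)) :
    (l.foldl (a_step d) s).2 =
      l.foldl (fun a r => PySem.List.pySetD a (b_fr d r) (PySem.List.pyGetD a (b_fr d r) [] ++ [b_to d r])) s.2 := by
  induction l generalizing s with
  | nil => rfl
  | cons r l ih =>
    simp only [List.foldl_cons, ih]
    congr 1

lemma adj0_eq (id_list : List String) :
    (PySem.List.pyRange 0 (PySem.List.len id_list)).foldl (fun a _ => a ++ [([] : List Int)]) [] =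
      List.replicate id_list.length ([] : List Int) := by
  rw [show (fun (a : List (List Int)) (_ : Int) => a ++ [([] : List Int)]) =
        (fun a x => a ++ [(fun _ => ([] : List Int)) x]) from rfl,
      PySem.List.foldl_append_singleton_eq_map]
  simp [PySem.List.len, PySem.List.pyRange_zero_natCast, Function.comp_def, List.map_const']

-- counter fold characterisation
lemma cnt_fold (t : String → Int) (l : List String) (c : List Int)
    (hb : ∀ r ∈ l, 0 ≤ t r ∧ t r < (c.length : Int)) :
    (l.foldl (fun c r => PySem.List.pySetD c (t r) (PySem.List.pyGetD c (t r) 0 + 1)) c).length = c.length ∧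
    ∀ j : Nat,
      PySem.List.pyGetD (l.foldl (fun c r => PySem.List.pySetD c (t r) (PySem.List.pyGetD c (t r) 0 + 1)) c) (j : Int) 0 =
        PySem.List.pyGetD c (j : Int) 0 + (l.countP (fun r => t r == (j : Int)) : Int) := by
  induction l generalizing c with
  | nil => simp
  | cons r l ih =>
    have hr := hb r List.mem_cons_self
    have hlen : (PySem.List.pySetD c (t r) (PySem.List.pyGetD c (t r) 0 + 1)).length = c.length :=
      PySem.List.length_pySetD c _ _
    obtain ⟨ihlen, ihval⟩ := ih (PySem.List.pySetD c (t r) (PySem.List.pyGetD c (t r) 0 + 1))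
      (fun q hq => by rw [hlen]; exact hb q (List.mem_cons_of_mem _ hq))
    refine ⟨by rw [List.foldl_cons, ihlen, hlen], fun j => ?_⟩
    rw [List.foldl_cons, ihval j]
    have htr : t r = ((t r).toNat : Int) := by omega
    have hlt : (t r).toNat < c.length := by omega
    rw [show PySem.List.pySetD c (t r) (PySem.List.pyGetD c (t r) 0 + 1) =
          PySem.List.pySetD c (((t r).toNat : Int)) (PySem.List.pyGetD c (((t r).toNat : Int)) 0 + 1) from by
        rw [← htr],
      PySem.List.pyGetD_pySetD_natCast c _ j _ _ hlt]
    by_cases hj : j = (t r).toNat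
    · subst hj
      have hbeq : (t r == (((t r).toNat : Nat) : Int)) = true := by
        simp only [beq_iff_eq]; omega
      simp only [List.countP_cons, hbeq, if_true]
      push_cast
      omega
    · have hbeq : (t r == (j : Int)) = false := by
        simp only [beq_eq_false_iff_ne, ne_eq]; omega
      simp only [if_neg hj, List.countP_cons, hbeq]
      simp

-- grouping fold characterisation (A's adjacency lists)
lemma adj_fold (f t : String → Int) (l : List String) (a : List (List Int))
    (hb : ∀ r ∈ l, 0 ≤ f r ∧ f r < (a.length : Int)) :
    (l.foldl (fun a r => PySem.List.pySetD a (f r) (PySem.List.pyGetD a (f r) [] ++ [t r])) a).length = a.length ∧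
    ∀ j : Nat,
      PySem.List.pyGetD (l.foldl (fun a r => PySem.List.pySetD a (f r) (PySem.List.pyGetD a (f r) [] ++ [t r])) a) (j : Int) [] =
        PySem.List.pyGetD a (j : Int) [] ++ (l.filter (fun r => f r == (j : Int))).map t := by
  induction l generalizing a with
  | nil => simp
  | cons r l ih =>
    have hr := hb r List.mem_cons_self
    have hlen : (PySem.List.pySetD a (f r) (PySem.List.pyGetD a (f r) [] ++ [t r])).length = a.length :=
      PySem.List.length_pySetD a _ _
    obtain ⟨ihlen, ihval⟩ := ih (PySem.List.pySetD a (f r) (PySem.List.pyGetD a (f r) [] ++ [t r]))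
      (fun q hq => by rw [hlen]; exact hb q (List.mem_cons_of_mem _ hq))
    refine ⟨by rw [List.foldl_cons, ihlen, hlen], fun j => ?_⟩
    rw [List.foldl_cons, ihval j]
    have htr : f r = (((f r).toNat : Nat) : Int) := by omega
    have hlt : (f r).toNat < a.length := by omega
    rw [show PySem.List.pySetD a (f r) (PySem.List.pyGetD a (f r) [] ++ [t r]) =
          PySem.List.pySetD a (((f r).toNat : Int)) (PySem.List.pyGetD a (((f r).toNat : Int)) [] ++ [t r]) from by
        rw [← htr],
      PySem.List.pyGetD_pySetD_natCast a _ j _ _ hlt]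
    by_cases hj : j = (f r).toNat
    · subst hj
      have hbeq : (f r == (((f r).toNat : Nat) : Int)) = true := by
        simp only [beq_iff_eq]; omega
      simp [hr.1]
    · have hbeq : (f r == (j : Int)) = false := by
        simp only [beq_eq_false_iff_ne, ne_eq]; omega
      simp [if_neg hj, hbeq]

-- conditional counter fold characterisation (B's answer pass)
lemma ans_fold (q : String → Bool) (f : String → Int) (l : List String) (c : List Int)
    (hb : ∀ r ∈ l, 0 ≤ f r ∧ f r < (c.length : Int)) :
    (l.foldl (fun a r => if q r then PySem.List.pySetD a (f r) (PySem.List.pyGetD a (f r) 0 + 1) else a) c).length = c.length ∧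
    ∀ j : Nat,
      PySem.List.pyGetD (l.foldl (fun a r => if q r then PySem.List.pySetD a (f r) (PySem.List.pyGetD a (f r) 0 + 1) else a) c) (j : Int) 0 =
        PySem.List.pyGetD c (j : Int) 0 + (l.countP (fun r => q r && (f r == (j : Int))) : Int) := by
  rw [← List.foldl_filter (p := q)
        (f := fun a r => PySem.List.pySetD a (f r) (PySem.List.pyGetD a (f r) 0 + 1))]
  obtain ⟨hlen, hval⟩ := cnt_fold f (l.filter q) c
    (fun r hr => hb r (List.mem_of_mem_filter hr))
  refine ⟨hlen, fun j => ?_⟩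
  rw [hval j, List.countP_filter]
  have hcp : List.countP (fun a => f a == (j : Int) && q a) l =
      List.countP (fun r => q r && (f r == (j : Int))) l :=
    List.countP_congr (fun a _ => by simp [Bool.and_comm])
  rw [hcp]

lemma pyGetD_replicate {α : Type} (n j : Nat) (x : α) :
    PySem.List.pyGetD (List.replicate n x) (j : Int) x = x := by
  rw [PySem.List.pyGetD_natCast]
  simp only [List.getD, List.getElem?_replicate]
  split <;> rfl

theorem solution_eq (id_list : List String) (report : List String) (k : Int)
    (hpre : Pre_solution id_list report k) :
    solution id_list report k = solution_alt id_list report k := by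
  simp only [solution, solution_alt, name2id_eq, adj0_eq]
  rw [a_fold_fst, a_fold_snd]
  set d := a_name2id id_list with hd
  set n := id_list.length with hn
  set res := PySem.Set.ofList report with hres
  have hmem : ∀ r ∈ res, r ∈ report := fun r hr => (PySem.Set.mem_ofList report r).1 hr
  have hfr : ∀ r ∈ res, 0 ≤ b_fr d r ∧ b_fr d r < (n : Int) := by
    intro r hr
    simp only [b_fr, hd]
    exact name2id_bound id_list _ (hpre r (hmem r hr)).2.1
  have hto : ∀ r ∈ res, 0 ≤ b_to d r ∧ b_to d r < (n : Int) := by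
    intro r hr
    simp only [b_to, hd]
    exact name2id_bound id_list _ (hpre r (hmem r hr)).2.2
  set cnt := res.foldl
      (fun c r => PySem.List.pySetD c (b_to d r) (PySem.List.pyGetD c (b_to d r) 0 + 1))
      (List.replicate n (0 : Int)) with hcnt
  obtain ⟨hcntlen, hcntval⟩ := cnt_fold (b_to d) res (List.replicate n 0)
    (fun r hr => by simpa using hto r hr)
  rw [← hcnt] at hcntlen hcntval
  have hcntlen' : cnt.length = n := by simpa using hcntlen
  have hcntval' : ∀ j : Nat,
      PySem.List.pyGetD cnt (j : Int) 0 = (res.countP (fun r => b_to d r == (j : Int)) : Int) := by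
    intro j
    rw [hcntval j, pyGetD_replicate]
    simp
  set adj := res.foldl
      (fun a r => PySem.List.pySetD a (b_fr d r) (PySem.List.pyGetD a (b_fr d r) [] ++ [b_to d r]))
      (List.replicate n ([] : List Int)) with hadj
  obtain ⟨hadjlen, hadjval⟩ := adj_fold (b_fr d) (b_to d) res (List.replicate n [])
    (fun r hr => by simpa using hfr r hr)
  rw [← hadj] at hadjlen hadjval
  have hadjlen' : adj.length = n := by simpa using hadjlen
  have hadjval' : ∀ j : Nat,
      PySem.List.pyGetD adj (j : Int) [] = (res.filter (fun r => b_fr d r == (j : Int))).map (b_to d) := by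
    intro j
    rw [hadjval j, pyGetD_replicate]
    simp
  set banned := PySem.Set.ofList
      ((PySem.List.pyRange 0 (PySem.List.len id_list)).filter
        (fun i => decide (PySem.List.pyGetD cnt i 0 ≥ k))) with hban
  have hbanmem : ∀ r ∈ res,
      banned.contains (b_to d r) = decide (PySem.List.pyGetD cnt (b_to d r) 0 > k - 1) := by
    intro r hr
    have hb := hto r hr
    have hiff : b_to d r ∈ banned ↔ (k ≤ PySem.List.pyGetD cnt (b_to d r) 0) := by
      rw [hban, PySem.Set.mem_ofList, List.mem_filter, PySem.List.mem_pyRange_one]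
      simp only [PySem.List.len, decide_eq_true_eq, ge_iff_le]
      constructor
      · exact fun h => h.2
      · exact fun h => ⟨⟨hb.1, by rw [← hn]; exact hb.2⟩, h⟩
    have hc : banned.contains (b_to d r) = decide (b_to d r ∈ banned) := by
      simp [PySem.Set.contains]
    rw [hc]
    rcases Classical.em (k ≤ PySem.List.pyGetD cnt (b_to d r) 0) with h | h
    · rw [decide_eq_true (hiff.2 h),
          decide_eq_true (show PySem.List.pyGetD cnt (b_to d r) 0 > k - 1 by omega)]
    · rw [decide_eq_false (fun hm => h (hiff.1 hm)), decide_eq_false (by omega)]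
  set ansB := res.foldl
      (fun a r => if banned.contains (b_to d r) then
          PySem.List.pySetD a (b_fr d r) (PySem.List.pyGetD a (b_fr d r) 0 + 1)
        else a) (List.replicate n (0 : Int)) with hansB
  obtain ⟨hanslen, hansval⟩ := ans_fold
    (fun r => banned.contains (b_to d r)) (b_fr d) res (List.replicate n 0)
    (fun r hr => by simpa using hfr r hr)
  rw [← hansB] at hanslen hansval
  have hanslen' : ansB.length = n := by simpa using hanslen
  have hansval' : ∀ j : Nat, PySem.List.pyGetD ansB (j : Int) 0 =
      (res.countP (fun r => banned.contains (b_to d r) && (b_fr d r == (j : Int))) : Int) := by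
    intro j
    rw [hansval j, pyGetD_replicate]
    simp
  rw [show (fun (ans : List Int) (row : List Int) =>
        ans ++ [row.foldl (fun c j => if PySem.List.pyGetD cnt j 0 > k - 1 then c + 1 else c) 0]) =
      (fun ans row => ans ++ [(fun (row : List Int) =>
        row.foldl (fun c j => if PySem.List.pyGetD cnt j 0 > k - 1 then c + 1 else c) 0) row]) from rfl,
    PySem.List.foldl_append_singleton_eq_map]
  apply List.ext_getElem
  · simp only [List.nil_append, List.length_map]
    rw [hadjlen', hanslen']
  intro i h1 h2
  have hi : i < n := by
    simpa [hadjlen'] using h1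
  have hi' : i < adj.length := by omega
  have hi'' : i < ansB.length := by omega
  have hrow : adj[i]'hi' = PySem.List.pyGetD adj (i : Int) [] := by
    rw [PySem.List.pyGetD_eq_getElem adj [] (Int.natCast_nonneg i) (by exact_mod_cast hi')]
    simp
  have hbi : ansB[i]'hi'' = PySem.List.pyGetD ansB (i : Int) 0 := by
    rw [PySem.List.pyGetD_eq_getElem ansB 0 (Int.natCast_nonneg i) (by exact_mod_cast hi'')]
    simp
  simp only [List.nil_append, List.getElem_map]
  rw [hrow, hbi, hansval' i, hadjval' i]
  have hinner : ∀ row : List Int,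
      row.foldl (fun c j => if PySem.List.pyGetD cnt j 0 > k - 1 then c + 1 else c) 0 =
        (row.countP (fun j => decide (PySem.List.pyGetD cnt j 0 > k - 1)) : Int) := by
    intro row
    have := PySem.List.foldl_count_if (fun j => decide (PySem.List.pyGetD cnt j 0 > k - 1)) row 0
    simpa using this
  rw [hinner, List.countP_map, List.countP_filter]
  have hcp : res.countP (fun r =>
        ((fun j => decide (PySem.List.pyGetD cnt j 0 > k - 1)) ∘ b_to d) r && (b_fr d r == (i : Int))) =
      res.countP (fun r => banned.contains (b_to d r) && (b_fr d r == (i : Int))) := by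
    apply List.countP_congr
    intro r hr
    simp only [Function.comp]
    rw [hbanmem r hr]
  rw [hcp]

-- ===== VERDICT (by name: the statement is the Claim_ definition above) =====
theorem solution_spec : Claim_equal_solution := by
  intro id_list report k _ hpre
  unfold Spec_solution
  exact solution_eq id_list report k hpre
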